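-- pv_equiv track=rewrite | github.com/DGomez1122/Portafolio2 | Partir Lista.py | AuxPartir
-- ===== SOURCE A (Python) =====
-- def AuxPartir(lista,sublista,resultado):
--     if lista==[]:
--         if sublista==[]:
--             return resultado
--         else:
--             return resultado+[sublista]
--     elif lista[0]>=0:
--         return AuxPartir(lista[1:],sublista+[lista[0]],resultado)
--     else:
--         return AuxPartir(lista[1:],[],resultado+[sublista])
-- ===== SOURCE B (Python) =====
-- def AuxPartir(lista, sublista, resultado):
--     # Build the groups back-to-front: walk lista in reverse, starting a new
--     # (empty) leading group at each negative element, then prepend sublista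
--     # to the first group and drop the last group if it is empty.
--     groups = [[]]
--     for x in reversed(lista):
--         if x >= 0:
--             groups[0] = [x] + groups[0]
--         else:
--             groups = [[]] + groups
--     groups[0] = sublista + groups[0]
--     if groups[-1] == []:
--         groups = groups[:-1]
--     return resultado + groups
-- ===== Notes on version B (the rewrite author's own statement) =====
-- stated objective: alternative
-- what changed: A is a left-to-right tail recursion threading an accumulator sublist and result through each call; B builds the group list back-to-front with a single reverse pass (starting a fresh group at each negative), then prepends sublista to the first group and drops a trailing empty group.
import Mathlib
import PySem

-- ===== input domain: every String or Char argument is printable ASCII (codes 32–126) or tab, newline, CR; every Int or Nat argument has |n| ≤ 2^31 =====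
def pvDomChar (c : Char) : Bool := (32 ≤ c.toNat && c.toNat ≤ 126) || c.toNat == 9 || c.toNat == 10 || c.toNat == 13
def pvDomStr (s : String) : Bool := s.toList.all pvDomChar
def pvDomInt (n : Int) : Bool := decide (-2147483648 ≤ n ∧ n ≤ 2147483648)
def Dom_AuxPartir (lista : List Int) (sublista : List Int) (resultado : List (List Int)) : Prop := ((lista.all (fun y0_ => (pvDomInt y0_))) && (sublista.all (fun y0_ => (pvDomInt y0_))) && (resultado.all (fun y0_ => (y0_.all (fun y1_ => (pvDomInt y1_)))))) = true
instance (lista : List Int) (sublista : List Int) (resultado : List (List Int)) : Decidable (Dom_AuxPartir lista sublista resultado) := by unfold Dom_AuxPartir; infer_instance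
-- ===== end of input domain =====

-- B replaces A's left-to-right accumulator recursion by a single back-to-front
-- construction of the groups plus post-processing (objective: alternative).

-- ===== PORT A =====
def AuxPartir (lista : List Int) (sublista : List Int) (resultado : List (List Int)) : List (List Int) :=
  match lista with
  | [] => if sublista = [] then resultado else resultado ++ [sublista]
  | x :: rest =>
      if x ≥ 0 then AuxPartir rest (sublista ++ [x]) resultado
      else AuxPartir rest [] (resultado ++ [sublista])

-- ===== PORT B =====
-- groups after the reversed loop of Source B (foldr = iterate over reversed(lista))
def pvGroups (lista : List Int) : List (List Int) :=
  lista.foldr (fun x gs =>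
    if x ≥ 0 then
      match gs with
      | g :: rest => (x :: g) :: rest
      | [] => [[x]]          -- unreachable: gs is always nonempty
    else [] :: gs) [[]]

def AuxPartir_alt (lista : List Int) (sublista : List Int) (resultado : List (List Int)) : List (List Int) :=
  let groups :=
    match pvGroups lista with
    | g :: rest => (sublista ++ g) :: rest
    | [] => [sublista]       -- unreachable
  let groups := if groups.getLast? = some [] then groups.dropLast else groups
  resultado ++ groups

-- ===== PRECONDITION & SPEC =====
def Spec_AuxPartir (lista : List Int) (sublista : List Int) (resultado : List (List Int)) (out : List (List Int)) : Prop := out = AuxPartir_alt lista sublista resultado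
instance (lista : List Int) (sublista : List Int) (resultado : List (List Int)) (out : List (List Int)) : Decidable (Spec_AuxPartir lista sublista resultado out) := by unfold Spec_AuxPartir; infer_instance

-- ===== CLAIM (what is proved, stated in full; the proofs are below) =====
def Claim_equal_AuxPartir : Prop := ∀ (lista : List Int) (sublista : List Int) (resultado : List (List Int)), Dom_AuxPartir lista sublista resultado → Spec_AuxPartir lista sublista resultado (AuxPartir lista sublista resultado)

-- ===== LEMMAS AND PROOFS =====
theorem pvGroups_ne_nil (lista : List Int) : pvGroups lista ≠ [] := by
  induction lista with
  | nil => simp [pvGroups]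
  | cons x rest ih =>
      simp only [pvGroups, List.foldr] at *
      split
      · cases h : rest.foldr _ [[]] <;> simp_all
      · simp

theorem AuxPartir_eq_alt (lista : List Int) :
    ∀ sublista resultado, AuxPartir lista sublista resultado = AuxPartir_alt lista sublista resultado := by
  induction lista with
  | nil =>
      intro sublista resultado
      by_cases h : sublista = [] <;>
        simp [AuxPartir, AuxPartir_alt, pvGroups, h]
  | cons x rest ih =>
      intro sublista resultado
      obtain ⟨g, gr, hg⟩ : ∃ g gr, pvGroups rest = g :: gr := by
        cases h : pvGroups rest with
        | nil => exact absurd h (pvGroups_ne_nil rest)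
        | cons g gr => exact ⟨g, gr, rfl⟩
      have hstep : pvGroups (x :: rest)
          = if x ≥ 0 then (x :: g) :: gr else [] :: g :: gr := by
        simp only [pvGroups, List.foldr] at hg ⊢
        rw [hg]
      by_cases hx : x ≥ 0
      · rw [show AuxPartir (x :: rest) sublista resultado
              = AuxPartir rest (sublista ++ [x]) resultado by simp [AuxPartir, hx],
            ih]
        simp only [AuxPartir_alt, hstep, hg, if_pos hx]
        simp
      · rw [show AuxPartir (x :: rest) sublista resultado
              = AuxPartir rest [] (resultado ++ [sublista]) by simp [AuxPartir, hx],
            ih]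
        simp only [AuxPartir_alt, hstep, hg, if_neg hx]
        simp only [List.nil_append]
        rw [List.getLast?_cons_cons, List.append_assoc, List.singleton_append]
        split
        · rw [List.dropLast_cons₂]; simp
        · simp

-- ===== VERDICT (by name: the statement is the Claim_ definition above) =====
theorem AuxPartir_spec : Claim_equal_AuxPartir := by
  intro lista sublista resultado _
  unfold Spec_AuxPartir
  exact AuxPartir_eq_alt lista sublista resultado
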